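-- pv_equiv track=rewrite | github.com/Simon-Krzysiak/python-learning | temp.py | createAnagram
-- ===== SOURCE A (Python) =====
-- def createAnagram(s, t):
--     letters_t = dict()
--     letters_s = dict()
--
--     for char in s:
--         letters_s[char] = letters_s.get(char,0) + 1
--
--     for char in t:
--         letters_t[char] = letters_t.get(char,0) + 1
--
--     count = 0
--     for char in letters_t:
--         count += max(letters_t[char]-letters_s.get(char,0),0)
--     return count
-- ===== SOURCE B (Python) =====
-- def createAnagram(s, t):
--     # Greedy matching: build one pool of s's characters, then consume it
--     # while scanning t once; each character of t that cannot be drawn from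
--     # the pool must be added.
--     remaining = {}
--     for ch in s:
--         remaining[ch] = remaining.get(ch, 0) + 1
--     missing = 0
--     for ch in t:
--         if remaining.get(ch, 0) > 0:
--             remaining[ch] -= 1
--         else:
--             missing += 1
--     return missing
-- ===== Notes on version B (the rewrite author's own statement) =====
-- stated objective: alternative
-- what changed: B builds no frequency map of t at all: it keeps a single mutable pool of s's characters and scans t once, greedily consuming a pooled character per match and counting each character of t it cannot draw from the pool.
import Mathlib
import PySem

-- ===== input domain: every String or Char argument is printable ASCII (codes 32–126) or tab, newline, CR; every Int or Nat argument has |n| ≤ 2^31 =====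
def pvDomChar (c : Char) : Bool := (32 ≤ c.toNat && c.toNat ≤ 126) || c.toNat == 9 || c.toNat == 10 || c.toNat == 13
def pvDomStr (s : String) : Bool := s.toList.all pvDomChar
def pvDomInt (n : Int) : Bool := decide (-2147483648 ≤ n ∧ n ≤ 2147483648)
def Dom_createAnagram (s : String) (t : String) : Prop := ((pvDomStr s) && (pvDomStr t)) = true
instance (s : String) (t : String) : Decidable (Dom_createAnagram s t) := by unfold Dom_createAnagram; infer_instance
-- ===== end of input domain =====

-- B drops A's second frequency map: it keeps one mutable pool of s's characters and scans t once, counting characters it cannot draw from the pool; alternative single-scan algorithm, same cost.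


-- ===== PORT A =====
def createAnagram (s : String) (t : String) : Int :=
  let letters_s := s.toList.foldl (fun d c => d.insert c (d.getD c 0 + 1)) PySem.Dict.empty
  let letters_t := t.toList.foldl (fun d c => d.insert c (d.getD c 0 + 1)) PySem.Dict.empty
  letters_t.keys.foldl (fun count c => count + max (letters_t.getD c 0 - letters_s.getD c 0) 0) 0

-- ===== PORT B =====
def createAnagram_alt (s : String) (t : String) : Int :=
  let remaining := s.toList.foldl (fun d c => d.insert c (d.getD c 0 + 1)) PySem.Dict.empty
  (t.toList.foldl
    (fun (st : PySem.Dict Char Int × Int) c =>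
      if st.1.getD c 0 > 0 then (st.1.insert c (st.1.getD c 0 - 1), st.2)
      else (st.1, st.2 + 1))
    (remaining, 0)).2

-- ===== PRECONDITION & SPEC =====
def Spec_createAnagram (s : String) (t : String) (out : Int) : Prop := out = createAnagram_alt s t
instance (s : String) (t : String) (out : Int) : Decidable (Spec_createAnagram s t out) := by unfold Spec_createAnagram; infer_instance

-- ===== CLAIM =====
def Claim_equal_createAnagram : Prop := ∀ (s : String) (t : String), Dom_createAnagram s t → Spec_createAnagram s t (createAnagram s t)

-- ===== LEMMAS AND PROOFS =====

-- sum over a nodup list of a function that differs from another only at one member x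
theorem sum_map_update (U : List Char) (hU : U.Nodup) (x : Char) (hx : x ∈ U)
    (f g : Char → Int) (hfg : ∀ c, c ≠ x → f c = g c) :
    (U.map f).sum = f x - g x + (U.map g).sum := by
  have hperm : U.Perm (x :: U.erase x) := List.perm_cons_erase hx
  rw [(hperm.map f).sum_eq, (hperm.map g).sum_eq]
  have herase : (U.erase x).map f = (U.erase x).map g := by
    apply List.map_congr_left
    intro c hc
    exact hfg c ((List.Nodup.mem_erase_iff hU).1 hc).1
  simp [herase]; ring

-- B's single scan over ts, from pool d (pointwise ≥ 0) and accumulator m,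
-- counts exactly the per-character deficits of ts against d, summed over any
-- nodup list U covering ts.
theorem loop_miss (ts : List Char) (U : List Char) (hU : U.Nodup)
    (hsub : ∀ c ∈ ts, c ∈ U) (d : PySem.Dict Char Int) (m : Int)
    (hd : ∀ c, 0 ≤ d.getD c 0) :
    (ts.foldl
      (fun (st : PySem.Dict Char Int × Int) c =>
        if st.1.getD c 0 > 0 then (st.1.insert c (st.1.getD c 0 - 1), st.2)
        else (st.1, st.2 + 1)) (d, m)).2
    = m + (U.map (fun k => max ((ts.count k : Int) - d.getD k 0) 0)).sum := by
  induction ts generalizing d m with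
  | nil =>
    simp only [List.foldl_nil]
    have hz : ∀ k ∈ U, max (((List.count k ([] : List Char)) : Int) - d.getD k 0) 0 = 0 :=
      fun k _ => by have := hd k; simp; omega
    rw [List.map_congr_left hz]; simp
  | cons x xs ih =>
    have hxU : x ∈ U := hsub x (List.mem_cons_self)
    have hsub' : ∀ c ∈ xs, c ∈ U := fun c hc => hsub c (List.mem_cons_of_mem _ hc)
    by_cases hpos : d.getD x 0 > 0
    · simp only [List.foldl_cons, if_pos hpos]
      rw [ih hsub' (d.insert x (d.getD x 0 - 1)) m
        (by intro c
            rw [PySem.Dict.getD_insert]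
            split_ifs with h
            · omega
            · exact hd c)]
      congr 1
      apply congrArg List.sum
      apply List.map_congr_left
      intro c _
      rw [PySem.Dict.getD_insert]
      by_cases hcx : c = x
      · subst hcx
        simp [List.count_cons_self]
        congr 1
        ring
      · simp only [List.count_cons]
        rw [if_neg (fun h => hcx (eq_of_beq h).symm)]
        simp [hcx]
    · have hz : d.getD x 0 = 0 := le_antisymm (by omega) (hd x)
      simp only [List.foldl_cons, if_neg hpos]
      rw [ih hsub' d (m + 1) hd]
      rw [sum_map_update U hU x hxU
        (fun k => max (((x :: xs).count k : Int) - d.getD k 0) 0)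
        (fun k => max ((xs.count k : Int) - d.getD k 0) 0)
        (by intro c hcx
            simp only [List.count_cons]
            rw [if_neg (fun h => hcx (eq_of_beq h).symm)]
            simp)]
      have h1 : max (((x :: xs).count x : Int) - d.getD x 0) 0 = (xs.count x : Int) + 1 := by
        rw [hz]; simp [List.count_cons_self]; omega
      have h2 : max ((xs.count x : Int) - d.getD x 0) 0 = (xs.count x : Int) := by
        rw [hz]; simp
      rw [h1, h2]; ring

-- ===== VERDICT =====
theorem createAnagram_spec : Claim_equal_createAnagram := by
  intro s t _
  unfold Spec_createAnagram createAnagram createAnagram_alt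
  simp only [PySem.Dict.foldl_insert_getD_add_one_eq_counter, PySem.Dict.keys_counter,
    PySem.List.foldl_add, PySem.Dict.getD_counter, zero_add]
  rw [loop_miss t.toList (PySem.Set.ofList t.toList) (PySem.Set.nodup_ofList _)
      (fun c hc => (PySem.Set.mem_ofList _ _).2 hc) (PySem.Dict.counter s.toList) 0
      (by intro c; rw [PySem.Dict.getD_counter]; positivity)]
  simp
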